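-- pv_equiv track=rewrite | github.com/PaulLupse/Proiect-Criptografie | pachete/conector/validator.py | _undefined_characters
-- ===== SOURCE A (Python) =====
-- def _undefined_characters(input_text, alfabet):
--
--     input_text = input_text.lower()
--     alfabet = alfabet.lower()
--     undefined_chars = set()
--     special_cases = ["i", "j"]
--
--     for char_text in input_text:
--         if char_text in special_cases:
--             if "i" not in alfabet and "j" not in alfabet:
--                 undefined_chars.add("i/j")
--         elif char_text != " " and char_text not in alfabet:
--                 undefined_chars.add(char_text)
--     if undefined_chars:
--         return f"Mesajul conține caractere nedefinite în alfabet: {', '.join(sorted(undefined_chars))}"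
--     else:
--         return None
-- ===== SOURCE B (Python) =====
-- def _undefined_characters(input_text, alfabet):
--     # Build the result directly in sorted order by scanning ASCII code space 0..127
--     # (all inputs are ASCII): no set, no sort.  "i/j" occupies the slot of code 105 ('i'),
--     # which is exactly its position in lexicographic order among the other entries.
--     text = input_text.lower()
--     alf = alfabet.lower()
--     parts = []
--     for k in range(128):
--         c = chr(k)
--         if c == "i":
--             if ("i" in text or "j" in text) and "i" not in alf and "j" not in alf:
--                 parts.append("i/j")
--         elif c != " " and c != "j" and c in text and c not in alf:
--             parts.append(c)
--     if parts:
--         return "Mesajul conține caractere nedefinite în alfabet: " + ", ".join(parts)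
--     return None
-- ===== Notes on version B (the rewrite author's own statement) =====
-- stated objective: alternative
-- what changed: Instead of accumulating an unordered set over the text and sorting it at the end, B emits the result already in sorted order by a single counting-sort-style sweep over the ASCII code space 0..127, testing each candidate character for membership in the text; the i/j collapse occupies code 105's slot, which is exactly its lexicographic position.
import Mathlib
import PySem

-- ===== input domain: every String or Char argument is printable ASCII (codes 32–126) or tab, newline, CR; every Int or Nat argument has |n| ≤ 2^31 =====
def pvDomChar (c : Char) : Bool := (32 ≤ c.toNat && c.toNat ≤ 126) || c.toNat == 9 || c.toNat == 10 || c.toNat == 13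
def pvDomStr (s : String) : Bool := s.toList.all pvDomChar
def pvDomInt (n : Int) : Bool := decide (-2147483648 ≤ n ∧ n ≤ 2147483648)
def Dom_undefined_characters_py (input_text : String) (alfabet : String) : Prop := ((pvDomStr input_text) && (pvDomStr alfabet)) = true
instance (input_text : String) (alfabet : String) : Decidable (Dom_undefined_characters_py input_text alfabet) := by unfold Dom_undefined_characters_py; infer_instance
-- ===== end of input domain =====

-- B replaces A's "accumulate an unordered set over the text, then sort it" by a counting-sort-style
-- sweep over the ASCII code space 0..127 that emits the result already in sorted order (the i/j
-- collapse sits in code 105's slot, its lexicographic position); objective: alternative algorithm.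

-- ===== PORT A =====
-- A's loop over the text; elements of the set are Python strings (1-char strings or "i/j").
-- Python's `"i" not in alfabet` / `char_text not in alfabet` are substring tests with a
-- single-character needle, which coincide exactly with character membership `alf.contains c`.
def pvLoopA (alf : List Char) (acc : PySem.Set String) : List Char → PySem.Set String
  | [] => acc
  | c :: rest =>
    pvLoopA alf
      (if c = 'i' ∨ c = 'j' then
        (if ¬ alf.contains 'i' ∧ ¬ alf.contains 'j' then acc.add "i/j" else acc)
       else if c ≠ ' ' ∧ ¬ alf.contains c then acc.add (String.ofList [c]) else acc)
      rest

def undefined_characters_py (input_text : String) (alfabet : String) : Option String :=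
  let text := PySem.Chars.lower input_text.toList
  let alf := PySem.Chars.lower alfabet.toList
  let undefined := pvLoopA alf PySem.Set.empty text
  if undefined = [] then none
  else some ("Mesajul conține caractere nedefinite în alfabet: "
    ++ PySem.Str.join ", " (PySem.List.sorted undefined (fun x => x) false))

-- ===== PORT B =====
-- the body of B's `for k in range(128)` loop: what gets appended to `parts` at code k
def pvSlot (text alf : List Char) (k : Nat) : List String :=
  let c := Char.ofNat k
  if c = 'i' then
    (if (text.contains 'i' || text.contains 'j') && !alf.contains 'i' && !alf.contains 'j'
     then ["i/j"] else [])
  else if c != ' ' && c != 'j' && text.contains c && !alf.contains c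
     then [String.ofList [c]] else []

-- B's loop over the codes 0..127, appending each slot's contribution in order
def pvLoopB (text alf : List Char) : List Nat → List String
  | [] => []
  | k :: rest => pvSlot text alf k ++ pvLoopB text alf rest

def undefined_characters_py_alt (input_text : String) (alfabet : String) : Option String :=
  let text := PySem.Chars.lower input_text.toList
  let alf := PySem.Chars.lower alfabet.toList
  let parts := pvLoopB text alf (List.range 128)
  if parts = [] then none
  else some ("Mesajul conține caractere nedefinite în alfabet: " ++ PySem.Str.join ", " parts)

-- ===== PRECONDITION & SPEC =====
def Spec_undefined_characters_py (input_text : String) (alfabet : String) (out : Option String) : Prop := out = undefined_characters_py_alt input_text alfabet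
instance (input_text : String) (alfabet : String) (out : Option String) : Decidable (Spec_undefined_characters_py input_text alfabet out) := by unfold Spec_undefined_characters_py; infer_instance

-- ===== CLAIM (what is proved, stated in full; the proofs are below) =====
def Claim_equal_undefined_characters_py : Prop := ∀ (input_text : String) (alfabet : String), Dom_undefined_characters_py input_text alfabet → Spec_undefined_characters_py input_text alfabet (undefined_characters_py input_text alfabet)

-- ===== LEMMAS AND PROOFS =====

-- what A's loop contributes for one text character c
def pvP (alf : List Char) (c : Char) (x : String) : Prop :=
  if c = 'i' ∨ c = 'j' then (¬ alf.contains 'i' ∧ ¬ alf.contains 'j') ∧ x = "i/j"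
  else c ≠ ' ' ∧ ¬ alf.contains c ∧ x = String.ofList [c]

theorem pv_mem_loopA (alf : List Char) : ∀ (text : List Char) (acc : PySem.Set String) (x : String),
    x ∈ pvLoopA alf acc text ↔ x ∈ acc ∨ ∃ c ∈ text, pvP alf c x := by
  intro text
  induction text with
  | nil => intro acc x; simp [pvLoopA]
  | cons c rest ih =>
    intro acc x
    simp only [pvLoopA, ih, List.mem_cons]
    constructor
    · rintro (h | ⟨d, hd, hPd⟩)
      · by_cases h1 : c = 'i' ∨ c = 'j'
        · simp only [if_pos h1] at h
          by_cases h2 : ¬ alf.contains 'i' ∧ ¬ alf.contains 'j'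
          · rw [if_pos h2, PySem.Set.mem_add] at h
            rcases h with h | h
            · exact Or.inl h
            · refine Or.inr ⟨c, Or.inl rfl, ?_⟩
              unfold pvP
              rw [if_pos h1]
              exact ⟨h2, h⟩
          · rw [if_neg h2] at h; exact Or.inl h
        · simp only [if_neg h1] at h
          by_cases h2 : c ≠ ' ' ∧ ¬ alf.contains c
          · rw [if_pos h2, PySem.Set.mem_add] at h
            rcases h with h | h
            · exact Or.inl h
            · refine Or.inr ⟨c, Or.inl rfl, ?_⟩
              unfold pvP
              rw [if_neg h1]
              exact ⟨h2.1, h2.2, h⟩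
          · rw [if_neg h2] at h; exact Or.inl h
      · exact Or.inr ⟨d, Or.inr hd, hPd⟩
    · rintro (h | ⟨d, (rfl | hd), hPd⟩)
      · left
        split_ifs <;> simp [PySem.Set.mem_add, h]
      · left
        unfold pvP at hPd
        by_cases h1 : d = 'i' ∨ d = 'j'
        · rw [if_pos h1] at hPd
          obtain ⟨h2, hx⟩ := hPd
          rw [if_pos h1, if_pos h2, PySem.Set.mem_add]
          exact Or.inr hx
        · rw [if_neg h1] at hPd
          obtain ⟨hs, ha, hx⟩ := hPd
          rw [if_neg h1, if_pos ⟨hs, ha⟩, PySem.Set.mem_add]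
          exact Or.inr hx
      · right; exact ⟨d, hd, hPd⟩

theorem pv_nodup_loopA (alf : List Char) : ∀ (text : List Char) (acc : PySem.Set String),
    acc.Nodup → (pvLoopA alf acc text).Nodup := by
  intro text
  induction text with
  | nil => intro acc h; simpa [pvLoopA] using h
  | cons c rest ih =>
    intro acc h
    simp only [pvLoopA]
    apply ih
    split_ifs <;> first | exact PySem.Set.nodup_add _ _ h | exact h

-- B's loop is the flattening of its slots
theorem pv_loopB_eq_flatten (text alf : List Char) : ∀ ks : List Nat,
    pvLoopB text alf ks = (ks.map (pvSlot text alf)).flatten := by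
  intro ks
  induction ks with
  | nil => rfl
  | cons k rest ih => simp [pvLoopB, ih]

theorem pv_toNat_ofNat_of_lt (k : Nat) (h : k < 128) : (Char.ofNat k).toNat = k := by
  rw [Char.toNat_ofNat, if_pos (Or.inl (by omega))]

-- membership in one slot of B
theorem pv_mem_slot (text alf : List Char) (k : Nat) (hk : k < 128) (x : String) :
    x ∈ pvSlot text alf k ↔
      (k = 105 ∧ ('i' ∈ text ∨ 'j' ∈ text) ∧ 'i' ∉ alf ∧ 'j' ∉ alf ∧ x = "i/j") ∨
      (Char.ofNat k ≠ 'i' ∧ Char.ofNat k ≠ ' ' ∧ Char.ofNat k ≠ 'j' ∧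
        Char.ofNat k ∈ text ∧ Char.ofNat k ∉ alf ∧ x = String.ofList [Char.ofNat k]) := by
  unfold pvSlot
  by_cases hi : Char.ofNat k = 'i'
  · have hk105 : k = 105 := by
      have := pv_toNat_ofNat_of_lt k hk
      rw [hi] at this
      exact this.symm.trans rfl
    rw [if_pos hi]
    by_cases hc : ((text.contains 'i' || text.contains 'j') && !alf.contains 'i' && !alf.contains 'j') = true
    · rw [if_pos hc]
      simp only [Bool.and_eq_true, Bool.or_eq_true, Bool.not_eq_true',
        List.contains_eq_mem, decide_eq_true_eq, decide_eq_false_iff_not, and_assoc] at hc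
      simp only [List.mem_singleton]
      constructor
      · intro h
        refine Or.inl ⟨hk105, hc.1, ?_, ?_, h⟩
        · simpa using hc.2.1
        · simpa using hc.2.2
      · rintro (⟨_, _, _, _, h⟩ | ⟨h, _⟩)
        · exact h
        · exact absurd hi h
    · rw [if_neg hc]
      simp only [List.not_mem_nil, false_iff]
      rintro (⟨_, h1, h2, h3, _⟩ | ⟨h, _⟩)
      · refine hc ?_
        simp only [Bool.and_eq_true, Bool.or_eq_true, Bool.not_eq_true',
          List.contains_eq_mem, decide_eq_true_eq, decide_eq_false_iff_not]
        refine ⟨⟨?_, ?_⟩, ?_⟩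
        · rcases h1 with h1 | h1
          · exact Or.inl (by simpa using h1)
          · exact Or.inr (by simpa using h1)
        · simpa using h2
        · simpa using h3
      · exact h hi
  · rw [if_neg hi]
    by_cases hc : (Char.ofNat k != ' ' && Char.ofNat k != 'j' && text.contains (Char.ofNat k)
        && !alf.contains (Char.ofNat k)) = true
    · rw [if_pos hc]
      simp only [Bool.and_eq_true, bne_iff_ne, Bool.not_eq_true',
        List.contains_eq_mem, decide_eq_true_eq, decide_eq_false_iff_not] at hc
      simp only [List.mem_singleton]
      constructor
      · intro h
        exact Or.inr ⟨hi, hc.1.1.1, hc.1.1.2, hc.1.2, hc.2, h⟩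
      · rintro (⟨hk105, _⟩ | ⟨_, _, _, _, _, h⟩)
        · exact absurd (by rw [hk105]) hi
        · exact h
    · rw [if_neg hc]
      simp only [List.not_mem_nil, false_iff]
      rintro (⟨hk105, _⟩ | ⟨_, h1, h2, h3, h4, _⟩)
      · exact hi (by rw [hk105])
      · refine hc ?_
        simp only [Bool.and_eq_true, bne_iff_ne, Bool.not_eq_true',
          List.contains_eq_mem, decide_eq_true_eq, decide_eq_false_iff_not]
        exact ⟨⟨⟨h1, h2⟩, h3⟩, h4⟩

-- elements of earlier slots are lexicographically smaller than elements of later slots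
theorem pv_slot_lt (text alf : List Char) (k1 k2 : Nat) (hk1 : k1 < 128) (hk2 : k2 < 128)
    (hlt : k1 < k2) (x y : String) (hx : x ∈ pvSlot text alf k1) (hy : y ∈ pvSlot text alf k2) :
    x < y := by
  have h1 := (pv_mem_slot text alf k1 hk1 x).mp hx
  have h2 := (pv_mem_slot text alf k2 hk2 y).mp hy
  have hc1 := pv_toNat_ofNat_of_lt k1 hk1
  have hc2 := pv_toNat_ofNat_of_lt k2 hk2
  have hi105 : Char.toNat 'i' = 105 := rfl
  rw [String.lt_iff_toList_lt]
  rcases h1 with ⟨hk105, _, _, _, rfl⟩ | ⟨_, _, _, _, _, rfl⟩ <;>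
    rcases h2 with ⟨hk105', _, _, _, rfl⟩ | ⟨hne, _, _, _, _, rfl⟩
  · omega
  · have hk2ne : k2 ≠ 105 := fun h => hne (by rw [h])
    have : 'i' < Char.ofNat k2 := Char.lt_def.mpr (by show Char.toNat 'i' < (Char.ofNat k2).toNat; rw [hi105, hc2]; omega)
    simpa using List.Lex.rel this
  · have : Char.ofNat k1 < 'i' := Char.lt_def.mpr (by show (Char.ofNat k1).toNat < Char.toNat 'i'; rw [hi105, hc1]; omega)
    simpa using List.Lex.rel this
  · have : Char.ofNat k1 < Char.ofNat k2 := Char.lt_def.mpr (by show (Char.ofNat k1).toNat < (Char.ofNat k2).toNat; rw [hc1, hc2]; omega)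
    simpa using List.Lex.rel this

-- B's output is strictly increasing
theorem pv_pairwise_loopB (text alf : List Char) :
    (pvLoopB text alf (List.range 128)).Pairwise (· < ·) := by
  rw [pv_loopB_eq_flatten, List.pairwise_flatten]
  constructor
  · intro l hl
    rw [List.mem_map] at hl
    obtain ⟨k, _, rfl⟩ := hl
    unfold pvSlot
    dsimp only
    split_ifs <;> simp
  · rw [List.pairwise_map]
    refine List.Pairwise.imp_of_mem ?_ List.pairwise_lt_range
    intro a b ha hb hab x hx y hy
    exact pv_slot_lt text alf a b (List.mem_range.mp ha) (List.mem_range.mp hb) hab x y hx hy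

-- B's output has the same members as A's set (text chars are ASCII < 128)
theorem pv_memB (text alf : List Char) (htext : ∀ c ∈ text, c.toNat < 128) (x : String) :
    x ∈ pvLoopB text alf (List.range 128) ↔ ∃ c ∈ text, pvP alf c x := by
  rw [pv_loopB_eq_flatten]
  simp only [List.mem_flatten, List.mem_map]
  constructor
  · rintro ⟨l, ⟨k, hk, rfl⟩, hx⟩
    have hk128 := List.mem_range.mp hk
    rcases (pv_mem_slot text alf k hk128 x).mp hx with
      ⟨_, hij, hi, hj, rfl⟩ | ⟨hne_i, hne_sp, hne_j, hmem, hnalf, rfl⟩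
    · have hP : ∀ c, c = 'i' ∨ c = 'j' → pvP alf c "i/j" := by
        intro c hc
        unfold pvP
        rw [if_pos hc]
        exact ⟨⟨by simpa using hi, by simpa using hj⟩, rfl⟩
      rcases hij with h | h
      · exact ⟨'i', h, hP 'i' (Or.inl rfl)⟩
      · exact ⟨'j', h, hP 'j' (Or.inr rfl)⟩
    · refine ⟨Char.ofNat k, hmem, ?_⟩
      unfold pvP
      rw [if_neg (by tauto)]
      exact ⟨hne_sp, by simpa using hnalf, rfl⟩
  · rintro ⟨c, hc, hP⟩
    unfold pvP at hP
    by_cases hij : c = 'i' ∨ c = 'j'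
    · rw [if_pos hij] at hP
      obtain ⟨⟨hi, hj⟩, rfl⟩ := hP
      refine ⟨pvSlot text alf 105, ⟨105, List.mem_range.mpr (by omega), rfl⟩, ?_⟩
      refine (pv_mem_slot text alf 105 (by omega) _).mpr (Or.inl ⟨rfl, ?_, ?_, ?_, rfl⟩)
      · rcases hij with rfl | rfl
        · exact Or.inl hc
        · exact Or.inr hc
      · simpa using hi
      · simpa using hj
    · rw [if_neg hij] at hP
      obtain ⟨hsp, hna, rfl⟩ := hP
      have hk128 : c.toNat < 128 := htext c hc
      have hoc : Char.ofNat c.toNat = c := Char.ofNat_toNat c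
      refine ⟨pvSlot text alf c.toNat, ⟨c.toNat, List.mem_range.mpr hk128, rfl⟩, ?_⟩
      refine (pv_mem_slot text alf c.toNat hk128 _).mpr (Or.inr ?_)
      rw [hoc]
      exact ⟨fun h => hij (Or.inl h), hsp, fun h => hij (Or.inr h), hc, by simpa using hna, rfl⟩

-- lowercased Dom strings stay below code 128
theorem pv_lower_lt_128 (s : String) (hs : pvDomStr s = true) :
    ∀ c ∈ PySem.Chars.lower s.toList, c.toNat < 128 := by
  intro c hc
  rw [PySem.Chars.lower, List.mem_map] at hc
  obtain ⟨d, hd, rfl⟩ := hc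
  have hdom : pvDomChar d = true := by
    rw [pvDomStr, List.all_eq_true] at hs
    exact hs d hd
  have hd126 : d.toNat ≤ 126 := by
    rw [pvDomChar] at hdom
    simp only [Bool.or_eq_true, Bool.and_eq_true, decide_eq_true_eq, beq_iff_eq] at hdom
    omega
  unfold PySem.Chars.lowerChar
  by_cases hu : PySem.Chars.isupper d = true
  · rw [if_pos hu]
    have hup : 65 ≤ d.toNat ∧ d.toNat ≤ 90 := by
      unfold PySem.Chars.isupper at hu
      simp only [Bool.and_eq_true, decide_eq_true_eq] at hu
      obtain ⟨h1, h2⟩ := hu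
      rw [Char.le_def] at h1 h2
      exact ⟨h1, h2⟩
    rw [pv_toNat_ofNat_of_lt (d.toNat + 32) (by omega)]
    omega
  · rw [if_neg hu]
    omega

-- the main bridge, phrased over the lowered character lists
theorem pv_main (text alf : List Char) (htext : ∀ c ∈ text, c.toNat < 128) :
    (if pvLoopA alf PySem.Set.empty text = [] then none
     else some ("Mesajul conține caractere nedefinite în alfabet: "
       ++ PySem.Str.join ", " (PySem.List.sorted (pvLoopA alf PySem.Set.empty text) (fun x => x) false)))
    = (if pvLoopB text alf (List.range 128) = [] then none
       else some ("Mesajul conține caractere nedefinite în alfabet: "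
         ++ PySem.Str.join ", " (pvLoopB text alf (List.range 128)))) := by
  have hpw := pv_pairwise_loopB text alf
  have hndB : (pvLoopB text alf (List.range 128)).Nodup := hpw.imp ne_of_lt
  have hndA := pv_nodup_loopA alf text PySem.Set.empty (by simp [PySem.Set.empty])
  have hperm : (pvLoopB text alf (List.range 128)).Perm (pvLoopA alf PySem.Set.empty text) := by
    rw [List.perm_ext_iff_of_nodup hndB hndA]
    intro x
    rw [pv_memB text alf htext x, pv_mem_loopA alf text PySem.Set.empty x]
    simp [PySem.Set.empty]
  have hsorted : PySem.List.sorted (pvLoopA alf PySem.Set.empty text) (fun x => x) false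
      = pvLoopB text alf (List.range 128) :=
    PySem.List.sorted_eq_of_perm_of_pairwise_lt _ _ _ hperm hpw
  by_cases hA : pvLoopA alf PySem.Set.empty text = []
  · have hB : pvLoopB text alf (List.range 128) = [] := by
      rw [hA] at hperm
      exact hperm.eq_nil
    rw [if_pos hA, if_pos hB]
  · have hB : pvLoopB text alf (List.range 128) ≠ [] := by
      intro h
      rw [h] at hperm
      exact hA hperm.symm.eq_nil
    rw [if_neg hA, if_neg hB, hsorted]

-- ===== VERDICT (by name: the statement is the Claim_ definition above) =====
theorem undefined_characters_py_spec : Claim_equal_undefined_characters_py := by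
  intro input_text alfabet hdom
  have htext : ∀ c ∈ PySem.Chars.lower input_text.toList, c.toNat < 128 := by
    refine pv_lower_lt_128 input_text ?_
    unfold Dom_undefined_characters_py at hdom
    exact (Bool.and_eq_true _ _).mp hdom |>.1
  show undefined_characters_py input_text alfabet = undefined_characters_py_alt input_text alfabet
  exact pv_main (PySem.Chars.lower input_text.toList) (PySem.Chars.lower alfabet.toList) htext
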